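-- pv_equiv track=rewrite | github.com/venkat-0706/GFG | Difficulty: Medium/Maximum People Visible in a Line/maximum-people-visible-in-a-line.py | maxPeople
-- ===== SOURCE A (Python) =====
-- def maxPeople(arr):
--     n = len(arr)
--     if n == 0:
--         return 0
--
--     left = [-1] * n
--     right = [n] * n
--     stack = []
--
--     # Nearest greater or equal element on the left
--     for i in range(n):
--         while stack and arr[stack[-1]] < arr[i]:
--             stack.pop()
--         left[i] = stack[-1] if stack else -1
--         stack.append(i)
--
--     stack.clear()
--
--     # Nearest greater or equal element on the right
--     for i in range(n - 1, -1, -1):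
--         while stack and arr[stack[-1]] < arr[i]:
--             stack.pop()
--         right[i] = stack[-1] if stack else n
--         stack.append(i)
--
--     maxCount = 0
--     for i in range(n):
--         maxCount = max(maxCount, right[i] - left[i] - 1)
--
--     return maxCount
-- ===== SOURCE B (Python) =====
-- def maxPeople(arr):
--     n = len(arr)
--     best = 0
--     for i in range(n):
--         j = i - 1
--         while j >= 0 and arr[j] < arr[i]:
--             j -= 1
--         k = i + 1
--         while k < n and arr[k] < arr[i]:
--             k += 1
--         span = k - j - 1
--         if span > best:
--             best = span
--     return best
-- ===== Notes on version B (the rewrite author's own statement) =====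
-- stated objective: simpler
-- what changed: Replaced the two amortized monotonic-stack passes with auxiliary left/right arrays by a single loop that, for each index, scans directly leftward and rightward to the nearest >= element and keeps a running maximum span.
import Mathlib
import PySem

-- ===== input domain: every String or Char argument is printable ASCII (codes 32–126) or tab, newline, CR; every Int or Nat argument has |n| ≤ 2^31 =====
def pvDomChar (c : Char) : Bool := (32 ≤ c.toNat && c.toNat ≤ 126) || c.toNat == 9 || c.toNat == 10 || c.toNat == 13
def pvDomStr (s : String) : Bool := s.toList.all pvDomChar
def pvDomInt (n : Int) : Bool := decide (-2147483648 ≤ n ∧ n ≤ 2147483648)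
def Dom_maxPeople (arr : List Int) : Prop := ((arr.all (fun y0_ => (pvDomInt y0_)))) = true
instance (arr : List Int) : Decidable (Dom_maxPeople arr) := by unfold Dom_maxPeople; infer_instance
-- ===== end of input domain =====

-- B replaces A's two monotonic-stack passes by direct nearest->= scans per index (simpler, not faster).

-- ===== PORT A =====
-- arr[k] for a nonnegative index; every access below is in range, where getD equals Python's arr[k]
def pvGet (arr : List Int) (k : Nat) : Int := arr.getD k 0

-- Python's `while stack and arr[stack[-1]] < x: stack.pop()`; the stack is kept top-at-head
def popW (arr : List Int) (x : Int) : List Nat → List Nat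
  | [] => []
  | t :: rest => if pvGet arr t < x then popW arr x rest else t :: rest

-- `stack[-1] if stack else d`
def topOr (s : List Nat) (d : Int) : Int :=
  match s with
  | [] => d
  | t :: _ => (t : Int)

-- one iteration of A's left loop body over the state (left, stack)
def stepL (arr : List Int) (st : List Int × List Nat) (i : Nat) : List Int × List Nat :=
  let s := popW arr (pvGet arr i) st.2
  (st.1.set i (topOr s (-1)), i :: s)

-- one iteration of A's right loop body over the state (right, stack)
def stepR (arr : List Int) (n : Nat) (st : List Int × List Nat) (i : Nat) : List Int × List Nat :=
  let s := popW arr (pvGet arr i) st.2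
  (st.1.set i (topOr s (n : Int)), i :: s)

-- `maxCount = max(maxCount, right[i] - left[i] - 1)`
def stepM (left right : List Int) (m : Int) (i : Nat) : Int :=
  max m (right.getD i 0 - left.getD i 0 - 1)

def maxPeople (arr : List Int) : Int :=
  let n := arr.length
  if n = 0 then 0
  else
    -- for i in range(n): nearest greater-or-equal on the left
    let lp := (List.range n).foldl (stepL arr) (List.replicate n (-1), [])
    let left := lp.1
    -- for i in range(n-1, -1, -1): nearest greater-or-equal on the right
    let rp := (List.range n).reverse.foldl (stepR arr n) (List.replicate n (n : Int), [])
    let right := rp.1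
    (List.range n).foldl (stepM left right) 0

-- ===== PORT B =====
-- `while j >= 0 and arr[j] < x: j -= 1`  (j stays in range whenever accessed)
def bLeft (arr : List Int) (x : Int) (j : Int) : Int :=
  if h : 0 ≤ j ∧ arr.getD j.toNat 0 < x then bLeft arr x (j - 1) else j
termination_by (j + 1).toNat
decreasing_by omega

-- `while k < n and arr[k] < x: k += 1`
def bRight (arr : List Int) (x : Int) (k : Int) : Int :=
  if h : k < (arr.length : Int) ∧ arr.getD k.toNat 0 < x then bRight arr x (k + 1) else k
termination_by ((arr.length : Int) - k).toNat
decreasing_by omega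

def maxPeople_alt (arr : List Int) : Int :=
  (List.range arr.length).foldl
    (fun best i =>
      let j := bLeft arr (arr.getD i 0) ((i : Int) - 1)
      let k := bRight arr (arr.getD i 0) ((i : Int) + 1)
      let span := k - j - 1
      if span > best then span else best) 0

-- ===== PRECONDITION & SPEC =====
def Spec_maxPeople (arr : List Int) (out : Int) : Prop := out = maxPeople_alt arr
instance (arr : List Int) (out : Int) : Decidable (Spec_maxPeople arr out) := by unfold Spec_maxPeople; infer_instance

-- ===== CLAIM (what is proved, stated in full; the proofs are below) =====
def Claim_equal_maxPeople : Prop := ∀ (arr : List Int), Dom_maxPeople arr → Spec_maxPeople arr (maxPeople arr)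

-- ===== LEMMAS AND PROOFS =====

-- model of the left-pass stack after processing indices 0..i-1
def stkL (arr : List Int) : Nat → List Nat
  | 0 => []
  | i + 1 => i :: popW arr (pvGet arr i) (stkL arr i)

def leftVal (arr : List Int) (i : Nat) : Int :=
  topOr (popW arr (pvGet arr i) (stkL arr i)) (-1)

-- model of the right-pass stack after processing m indices (i = n-1 .. n-m)
def stkR (arr : List Int) : Nat → List Nat
  | 0 => []
  | m + 1 => (arr.length - 1 - m) :: popW arr (pvGet arr (arr.length - 1 - m)) (stkR arr m)

def rightVal (arr : List Int) (i : Nat) : Int :=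
  topOr (popW arr (pvGet arr i) (stkR arr (arr.length - 1 - i))) (arr.length : Int)

-- first uncovered index below the stack's coverage (exclusive upper end is loL)
def loL : List Nat → Nat
  | [] => 0
  | t :: _ => t + 1

def CovL (arr : List Int) : List Nat → Prop
  | [] => True
  | t :: rest => CovL arr rest ∧ ∀ k, loL rest ≤ k → k < t → pvGet arr k < pvGet arr t

def hiR (arr : List Int) : List Nat → Nat
  | [] => arr.length
  | t :: _ => t

def CovR (arr : List Int) : List Nat → Prop
  | [] => True
  | t :: rest => CovR arr rest ∧ ∀ k, t < k → k < hiR arr rest → pvGet arr k < pvGet arr t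

theorem popW_mem (arr : List Int) (x : Int) : ∀ s, ∀ a ∈ popW arr x s, a ∈ s := by
  intro s
  induction s with
  | nil => simp [popW]
  | cons t rest ih =>
      intro a ha
      by_cases h : pvGet arr t < x
      · simp only [popW, if_pos h] at ha
        exact List.mem_cons_of_mem _ (ih a ha)
      · simpa [popW, if_neg h] using ha

theorem popW_head_ge (arr : List Int) (x : Int) :
    ∀ s t r, popW arr x s = t :: r → ¬ pvGet arr t < x := by
  intro s
  induction s with
  | nil => intro t r h; simp [popW] at h
  | cons u rest ih =>
      intro t r h
      by_cases hu : pvGet arr u < x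
      · simp only [popW, if_pos hu] at h
        exact ih t r h
      · simp only [popW, if_neg hu] at h
        cases h
        exact hu

theorem popW_covL (arr : List Int) (x : Int) :
    ∀ s, CovL arr s →
      CovL arr (popW arr x s) ∧
      ∀ k, loL (popW arr x s) ≤ k → k < loL s → pvGet arr k < x := by
  intro s
  induction s with
  | nil =>
      intro _
      constructor
      · trivial
      · intro k _ hk; simp [loL] at hk
  | cons t rest ih =>
      intro h
      obtain ⟨hc, hg⟩ := h
      by_cases ht : pvGet arr t < x
      · have ⟨c', g'⟩ := ih hc
        simp only [popW, if_pos ht]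
        refine ⟨c', ?_⟩
        intro k hk1 hk2
        simp only [loL] at hk2
        by_cases hkt : k = t
        · subst hkt; exact ht
        · have hklt : k < t := by omega
          by_cases hkl : loL rest ≤ k
          · exact lt_trans (hg k hkl hklt) ht
          · exact g' k hk1 (by omega)
      · simp only [popW, if_neg ht]
        refine ⟨⟨hc, hg⟩, ?_⟩
        intro k hk1 hk2
        simp [loL] at hk1 hk2
        omega

theorem stkL_inv (arr : List Int) : ∀ i, CovL arr (stkL arr i) ∧ loL (stkL arr i) = i := by
  intro i
  induction i with
  | zero => exact ⟨trivial, rfl⟩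
  | succ i ih =>
      obtain ⟨hc, hl⟩ := ih
      have hp := popW_covL arr (pvGet arr i) (stkL arr i) hc
      refine ⟨⟨hp.1, ?_⟩, rfl⟩
      intro k hk1 hk2
      exact hp.2 k hk1 (by omega)

theorem stkL_mem_lt (arr : List Int) : ∀ i, ∀ a ∈ stkL arr i, a < i := by
  intro i
  induction i with
  | zero => simp [stkL]
  | succ i ih =>
      intro a ha
      simp only [stkL, List.mem_cons] at ha
      rcases ha with h | h
      · omega
      · exact Nat.lt_succ_of_lt (ih a (popW_mem arr _ _ a h))

theorem popW_covR (arr : List Int) (x : Int) :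
    ∀ s, CovR arr s →
      CovR arr (popW arr x s) ∧
      ∀ k, hiR arr s ≤ k → k < hiR arr (popW arr x s) → pvGet arr k < x := by
  intro s
  induction s with
  | nil =>
      intro _
      constructor
      · trivial
      · intro k hk1 hk2; simp [popW, hiR] at hk1 hk2; omega
  | cons t rest ih =>
      intro h
      obtain ⟨hc, hg⟩ := h
      by_cases ht : pvGet arr t < x
      · have ⟨c', g'⟩ := ih hc
        simp only [popW, if_pos ht]
        refine ⟨c', ?_⟩
        intro k hk1 hk2
        simp only [hiR] at hk1
        by_cases hkt : k = t
        · subst hkt; exact ht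
        · have htk : t < k := by omega
          by_cases hkh : k < hiR arr rest
          · exact lt_trans (hg k htk hkh) ht
          · exact g' k (by omega) hk2
      · simp only [popW, if_neg ht]
        refine ⟨⟨hc, hg⟩, ?_⟩
        intro k hk1 hk2
        simp [hiR] at hk1 hk2
        omega

theorem stkR_inv (arr : List Int) : ∀ m, m ≤ arr.length →
    CovR arr (stkR arr m) ∧ hiR arr (stkR arr m) = arr.length - m := by
  intro m
  induction m with
  | zero => intro _; exact ⟨trivial, by simp [stkR, hiR]⟩
  | succ m ih =>
      intro hm
      obtain ⟨hc, hl⟩ := ih (by omega)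
      have hp := popW_covR arr (pvGet arr (arr.length - 1 - m)) (stkR arr m) hc
      refine ⟨⟨hp.1, ?_⟩, by simp [stkR, hiR]; omega⟩
      intro k hk1 hk2
      exact hp.2 k (by omega) hk2

theorem stkR_mem (arr : List Int) : ∀ m, m ≤ arr.length →
    ∀ a ∈ stkR arr m, arr.length - m ≤ a ∧ a < arr.length := by
  intro m
  induction m with
  | zero => intro _; simp [stkR]
  | succ m ih =>
      intro hm a ha
      simp only [stkR, List.mem_cons] at ha
      rcases ha with h | h
      · omega
      · have := ih (by omega) a (popW_mem arr _ _ a h)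
        omega

-- one step / stop equations for the B-side scans
theorem bLeft_step (arr : List Int) (x : Int) (m : Int)
    (h0 : 0 ≤ m) (hlt : arr.getD m.toNat 0 < x) :
    bLeft arr x m = bLeft arr x (m - 1) := by
  conv_lhs => rw [bLeft]
  rw [dif_pos ⟨h0, hlt⟩]

theorem bLeft_stop (arr : List Int) (x : Int) (m : Int)
    (h : ¬ (0 ≤ m ∧ arr.getD m.toNat 0 < x)) :
    bLeft arr x m = m := by
  conv_lhs => rw [bLeft]
  rw [dif_neg h]

theorem bRight_step (arr : List Int) (x : Int) (m : Int)
    (h0 : m < (arr.length : Int)) (hlt : arr.getD m.toNat 0 < x) :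
    bRight arr x m = bRight arr x (m + 1) := by
  conv_lhs => rw [bRight]
  rw [dif_pos ⟨h0, hlt⟩]

theorem bRight_stop (arr : List Int) (x : Int) (m : Int)
    (h : ¬ (m < (arr.length : Int) ∧ arr.getD m.toNat 0 < x)) :
    bRight arr x m = m := by
  conv_lhs => rw [bRight]
  rw [dif_neg h]

theorem bLeft_skip (arr : List Int) (x : Int) :
    ∀ d : Nat, ∀ j m : Int, (m - j).toNat = d → -1 ≤ j → j ≤ m →
      (∀ k : Nat, j < (k : Int) → (k : Int) ≤ m → arr.getD k 0 < x) →
      bLeft arr x m = bLeft arr x j := by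
  intro d
  induction d with
  | zero =>
      intro j m hd _ hjm _
      have : j = m := by omega
      rw [this]
  | succ d ih =>
      intro j m hd hj hjm hall
      have hm0 : 0 ≤ m := by omega
      have hget : arr.getD m.toNat 0 < x := by
        have := hall m.toNat (by omega) (by omega)
        simpa using this
      rw [bLeft_step arr x m hm0 hget]
      exact ih j (m - 1) (by omega) hj (by omega)
        (fun k h1 h2 => hall k h1 (by omega))

theorem bRight_skip (arr : List Int) (x : Int) :
    ∀ d : Nat, ∀ k m : Int, (m - k).toNat = d → 0 ≤ k → k ≤ m → m ≤ (arr.length : Int) →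
      (∀ t : Nat, k ≤ (t : Int) → (t : Int) < m → arr.getD t 0 < x) →
      bRight arr x k = bRight arr x m := by
  intro d
  induction d with
  | zero =>
      intro k m hd _ hkm _ _
      have : k = m := by omega
      rw [this]
  | succ d ih =>
      intro k m hd hk hkm hmn hall
      have hkn : k < (arr.length : Int) := by omega
      have hget : arr.getD k.toNat 0 < x := by
        have := hall k.toNat (by omega) (by omega)
        simpa [Int.toNat_of_nonneg hk] using this
      rw [bRight_step arr x k hkn hget]
      exact ih (k + 1) m (by omega) (by omega) (by omega) hmn
        (fun t h1 h2 => hall t (by omega) h2)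

-- the per-index lookups: B's scans compute exactly the stack passes' values
theorem left_lookup (arr : List Int) (i : Nat) :
    bLeft arr (pvGet arr i) ((i : Int) - 1) = leftVal arr i := by
  obtain ⟨hc, hl⟩ := stkL_inv arr i
  have hp := popW_covL arr (pvGet arr i) (stkL arr i) hc
  unfold leftVal
  cases hs : popW arr (pvGet arr i) (stkL arr i) with
  | nil =>
      have hall : ∀ k : Nat, (-1 : Int) < (k : Int) → (k : Int) ≤ (i : Int) - 1 →
          arr.getD k 0 < pvGet arr i := by
        intro k _ h2
        have := hp.2 k (by rw [hs]; exact Nat.zero_le k) (by omega)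
        simpa [pvGet] using this
      rw [bLeft_skip arr (pvGet arr i) ((i : Int) - 1 - (-1)).toNat (-1) ((i : Int) - 1)
        rfl (by omega) (by omega) hall]
      rw [bLeft_stop arr _ (-1) (by omega)]
      simp [topOr]
  | cons t r =>
      have hge : ¬ pvGet arr t < pvGet arr i := popW_head_ge arr _ _ t r hs
      have hti : t < i := by
        have ht : t ∈ stkL arr i :=
          popW_mem arr _ _ t (by rw [hs]; exact List.mem_cons_self ..)
        exact stkL_mem_lt arr i t ht
      have hall : ∀ k : Nat, (t : Int) < (k : Int) → (k : Int) ≤ (i : Int) - 1 →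
          arr.getD k 0 < pvGet arr i := by
        intro k h1 h2
        have := hp.2 k (by rw [hs]; simp [loL]; omega) (by omega)
        simpa [pvGet] using this
      rw [bLeft_skip arr (pvGet arr i) ((i : Int) - 1 - t).toNat (t : Int) ((i : Int) - 1)
        rfl (by omega) (by omega) hall]
      rw [bLeft_stop arr _ (t : Int) (by rintro ⟨-, hcon⟩; exact hge (by simpa [pvGet] using hcon))]
      simp [topOr]

theorem right_lookup (arr : List Int) (i : Nat) (hi : i < arr.length) :
    bRight arr (pvGet arr i) ((i : Int) + 1) = rightVal arr i := by
  set n := arr.length with hn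
  set m := n - 1 - i with hmdef
  have hm : m ≤ n := by omega
  have hnm : n - m = i + 1 := by omega
  obtain ⟨hc, hl⟩ := stkR_inv arr m hm
  have hp := popW_covR arr (pvGet arr i) (stkR arr m) hc
  unfold rightVal
  rw [← hn, ← hmdef]
  cases hs : popW arr (pvGet arr i) (stkR arr m) with
  | nil =>
      have hall : ∀ t : Nat, ((i : Int) + 1) ≤ (t : Int) → (t : Int) < (n : Int) →
          arr.getD t 0 < pvGet arr i := by
        intro t h1 h2
        have := hp.2 t (by omega) (by rw [hs]; simp [hiR]; omega)
        simpa [pvGet] using this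
      rw [bRight_skip arr (pvGet arr i) ((n : Int) - ((i : Int) + 1)).toNat ((i : Int) + 1)
        (n : Int) rfl (by omega) (by omega) (by omega) hall]
      rw [bRight_stop arr _ (n : Int) (by omega)]
      simp [topOr]
  | cons t r =>
      have hge : ¬ pvGet arr t < pvGet arr i := popW_head_ge arr _ _ t r hs
      have htm : n - m ≤ t ∧ t < n := by
        have ht : t ∈ stkR arr m :=
          popW_mem arr _ _ t (by rw [hs]; exact List.mem_cons_self ..)
        exact stkR_mem arr m hm t ht
      have hall : ∀ u : Nat, ((i : Int) + 1) ≤ (u : Int) → (u : Int) < (t : Int) →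
          arr.getD u 0 < pvGet arr i := by
        intro u h1 h2
        have := hp.2 u (by omega) (by rw [hs]; simp [hiR]; omega)
        simpa [pvGet] using this
      rw [bRight_skip arr (pvGet arr i) ((t : Int) - ((i : Int) + 1)).toNat ((i : Int) + 1)
        (t : Int) rfl (by omega) (by omega) (by omega) hall]
      rw [bRight_stop arr _ (t : Int) (by
        intro hcon
        exact hge (by simpa [pvGet] using hcon.2))]
      simp [topOr]

theorem getD_set_eq (l : List Int) (i j : Nat) (v : Int) :
    (l.set i v).getD j 0 = if i = j ∧ i < l.length then v else l.getD j 0 := by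
  rcases lt_or_ge j l.length with h | h
  · simp [List.getD_eq_getElem?_getD, List.getElem?_set]
    split_ifs <;> simp_all
  · rw [List.getD_eq_default _ _ (by simpa using h), if_neg (by omega),
      List.getD_eq_default _ _ h]

-- A's left pass builds exactly (leftVal arr i) at each slot
theorem leftPass_inv (arr : List Int) : ∀ m,
    ((List.range m).foldl (stepL arr) (List.replicate arr.length (-1), ([] : List Nat))).2
      = stkL arr m ∧
    ((List.range m).foldl (stepL arr) (List.replicate arr.length (-1), ([] : List Nat))).1.length
      = arr.length ∧
    ∀ i, i < arr.length →
      ((List.range m).foldl (stepL arr) (List.replicate arr.length (-1), ([] : List Nat))).1.getD i 0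
        = if i < m then leftVal arr i else -1 := by
  intro m
  induction m with
  | zero =>
      refine ⟨rfl, by simp, ?_⟩
      intro i hilen
      rw [if_neg (by omega)]
      exact List.getD_replicate _ hilen
  | succ m ih =>
      obtain ⟨hstk, hlen, hval⟩ := ih
      rw [List.range_succ, List.foldl_append, List.foldl_cons, List.foldl_nil]
      set st := (List.range m).foldl (stepL arr) (List.replicate arr.length (-1), ([] : List Nat))
      refine ⟨?_, ?_, ?_⟩
      · simp only [stepL, hstk]; rfl
      · simp only [stepL]; rw [List.length_set]; exact hlen
      · intro i hilen
        simp only [stepL, hstk]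
        rw [getD_set_eq]
        by_cases him : i = m
        · subst him
          rw [if_pos ⟨rfl, by omega⟩, if_pos (by omega)]
          rfl
        · rw [if_neg (by omega)]
          rw [hval i hilen]
          by_cases hlt : i < m
          · rw [if_pos hlt, if_pos (by omega)]
          · rw [if_neg hlt, if_neg (by omega)]

-- A's right pass builds exactly (rightVal arr i) at each slot
theorem rightPass_inv (arr : List Int) : ∀ d c, d = arr.length - c → c ≤ arr.length →
    ∀ R : List Int, R.length = arr.length →
    (∀ i, i < arr.length → R.getD i 0 = if arr.length - c ≤ i then rightVal arr i
      else (arr.length : Int)) →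
    (((List.range (arr.length - c)).reverse.foldl (stepR arr arr.length) (R, stkR arr c)).1.length
        = arr.length) ∧
    ∀ i, i < arr.length →
      ((List.range (arr.length - c)).reverse.foldl (stepR arr arr.length) (R, stkR arr c)).1.getD i 0
        = rightVal arr i := by
  intro d
  induction d with
  | zero =>
      intro c hd hc R hRlen hR
      have h0 : arr.length - c = 0 := by omega
      rw [h0]
      simp only [List.range_zero, List.reverse_nil, List.foldl_nil]
      refine ⟨hRlen, ?_⟩
      intro i hilen
      rw [hR i hilen, if_pos (by omega)]
  | succ d ih =>
      intro c hd hc R hRlen hR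
      have hcl : c < arr.length := by omega
      have hrange : arr.length - c = (arr.length - c - 1) + 1 := by omega
      rw [hrange, List.range_succ, List.reverse_append, List.reverse_singleton]
      simp only [List.singleton_append, List.foldl_cons]
      have hidx : arr.length - c - 1 = arr.length - 1 - c := by omega
      have hstep : stepR arr arr.length (R, stkR arr c) (arr.length - c - 1)
          = (R.set (arr.length - c - 1) (rightVal arr (arr.length - c - 1)),
             stkR arr (c + 1)) := by
        simp only [stepR, stkR, hidx, rightVal]
        have : arr.length - 1 - (arr.length - 1 - c) = c := by omega
        rw [this]
      rw [hstep]
      have hres := ih (c + 1) (by omega) (by omega)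
        (R.set (arr.length - c - 1) (rightVal arr (arr.length - c - 1)))
        (by rw [List.length_set]; exact hRlen)
        (by
          intro i hilen
          rw [getD_set_eq]
          by_cases him : i = arr.length - c - 1
          · subst him
            rw [if_pos ⟨rfl, by omega⟩, if_pos (by omega)]
          · rw [if_neg (by omega)]
            rw [hR i hilen]
            by_cases hge : arr.length - c ≤ i
            · rw [if_pos hge, if_pos (by omega)]
            · rw [if_neg hge, if_neg (by omega)])
      have hrw : arr.length - c - 1 = arr.length - (c + 1) := by omega
      rw [hrw]
      exact hres

theorem max_eq_if (m v : Int) : max m v = if v > m then v else m := by omega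

-- ===== VERDICT (by name: the statement is the Claim_ definition above) =====
theorem maxPeople_spec : Claim_equal_maxPeople := by
  unfold Claim_equal_maxPeople
  intro arr _
  unfold Spec_maxPeople maxPeople maxPeople_alt
  by_cases hn : arr.length = 0
  · simp [hn]
  · rw [if_neg hn]
    obtain ⟨_, _, hleft⟩ := leftPass_inv arr arr.length
    have hright := rightPass_inv arr arr.length 0 (by omega) (by omega)
      (List.replicate arr.length (arr.length : Int)) (by simp)
      (by
        intro i hilen
        rw [if_neg (by omega)]
        exact List.getD_replicate _ hilen)
    simp only [Nat.sub_zero] at hright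
    obtain ⟨_, hrightv⟩ := hright
    simp only [stkR] at hrightv
    apply List.foldl_ext
    intro b i hi
    have hilen : i < arr.length := List.mem_range.mp hi
    simp only [stepM]
    rw [hleft i hilen, if_pos hilen, hrightv i hilen]
    rw [← left_lookup arr i, ← right_lookup arr i hilen]
    simp only [pvGet]
    rw [max_eq_if]
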